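-- pv_equiv track=rewrite | github.com/MooRoakee/2n_magic | main.py | get_common_str_front
-- ===== SOURCE A (Python) =====
-- def get_common_str_front(s1, s2):
--     for i in range(len(s1)):
--         flag = 0
--         for j in range(len(s2)):
--             if i + j < len(s1) and s1[i + j] != s2[j]:
--                 flag = 1
--                 break
--         if flag == 1:
--             pass
--         else:
--             return len(s1) - i
--
--     return len(s1) - i - 1
-- ===== SOURCE B (Python) =====
-- def get_common_str_front(s1, s2):
--     n = len(s1)
--     p = s1.find(s2)
--     if p != -1:
--         return n - p
--     for k in range(min(n, len(s2)), 0, -1):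
--         if s1.endswith(s2[:k]):
--             return k
--     return 0
-- ===== Notes on version B (the rewrite author's own statement) =====
-- stated objective: faster
-- what changed: A scans every start position with a nested character loop; B first locates a full occurrence of s2 with one str.find call and otherwise scans candidate overlap lengths downward with endswith, removing the hand-written inner character loop.
import Mathlib
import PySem

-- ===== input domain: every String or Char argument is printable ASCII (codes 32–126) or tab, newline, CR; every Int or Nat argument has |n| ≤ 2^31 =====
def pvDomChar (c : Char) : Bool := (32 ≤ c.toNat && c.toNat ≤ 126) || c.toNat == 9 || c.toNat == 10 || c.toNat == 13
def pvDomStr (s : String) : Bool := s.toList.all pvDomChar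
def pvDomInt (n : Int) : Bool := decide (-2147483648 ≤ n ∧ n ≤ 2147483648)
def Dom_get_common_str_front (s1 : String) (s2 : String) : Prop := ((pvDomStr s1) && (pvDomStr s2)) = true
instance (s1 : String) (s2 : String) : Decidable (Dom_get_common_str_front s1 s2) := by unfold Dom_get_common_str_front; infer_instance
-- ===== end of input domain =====

-- B replaces A's nested character loops by one str.find call plus a downward endswith scan
-- over candidate overlap lengths; equal return values proved on all inputs with s1 ≠ ''
-- (on s1 = '' the Python A raises UnboundLocalError).

-- ===== PORT A =====
-- inner 'for j in range(len(s2))' loop: 1 = flag set by the break, 0 = loop exhausted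
def pvAInner (l1 l2 : List Char) (i : Nat) : List Nat → Nat
  | [] => 0
  | j :: js =>
    if i + j < l1.length ∧ l1.getD (i + j) 'a' ≠ l2.getD j 'a' then 1
    else pvAInner l1 l2 i js

-- outer 'for i in range(len(s1))' loop over the index list: flag = 1 → next i, or when the
-- range is exhausted the final 'return len(s1) - i - 1'; flag = 0 → 'return len(s1) - i'
def pvAOuter (l1 l2 : List Char) : List Nat → Int
  | [] => 0
  | [i] =>
    if pvAInner l1 l2 i (List.range l2.length) = 1 then (l1.length : Int) - i - 1
    else (l1.length : Int) - i
  | i :: rest =>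
    if pvAInner l1 l2 i (List.range l2.length) = 1 then pvAOuter l1 l2 rest
    else (l1.length : Int) - i

-- on s1 = '' Python raises UnboundLocalError (loop variable i never bound): outside Pre_
def get_common_str_front (s1 : String) (s2 : String) : Int :=
  if s1.toList.length = 0 then 0
  else pvAOuter s1.toList s2.toList (List.range s1.toList.length)

-- ===== PORT B =====
-- 'for k in range(min(n, len(s2)), 0, -1): if s1.endswith(s2[:k]): return k' then 'return 0'
def pvBLoop (l1 l2 : List Char) : Nat → Int
  | 0 => 0
  | k + 1 =>
    if PySem.Chars.endswith l1 (PySem.List.slice l2 none (some ((k + 1 : Nat) : Int))) then ((k + 1 : Nat) : Int)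
    else pvBLoop l1 l2 k

def get_common_str_front_alt (s1 : String) (s2 : String) : Int :=
  let n : Nat := s1.toList.length
  let p : Int := PySem.Str.find s1 s2
  if p ≠ -1 then (n : Int) - p
  else pvBLoop s1.toList s2.toList (min n s2.toList.length)

-- ===== PRECONDITION & SPEC =====
-- Pre_ excludes only s1 = '', on which Python A raises UnboundLocalError (i never bound).
def Pre_get_common_str_front (s1 : String) (s2 : String) : Prop := s1 ≠ ""
instance (s1 : String) (s2 : String) : Decidable (Pre_get_common_str_front s1 s2) := by
  unfold Pre_get_common_str_front; infer_instance

def pvWitness_get_common_str_front : String × String := ("ab", "b")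

def Spec_get_common_str_front (s1 : String) (s2 : String) (out : Int) : Prop :=
  out = get_common_str_front_alt s1 s2
instance (s1 : String) (s2 : String) (out : Int) : Decidable (Spec_get_common_str_front s1 s2 out) := by
  unfold Spec_get_common_str_front; infer_instance

-- ===== CLAIM (what is proved, stated in full; the proofs are below) =====
def Claim_equal_get_common_str_front : Prop := ∀ (s1 : String) (s2 : String), Dom_get_common_str_front s1 s2 → Pre_get_common_str_front s1 s2 → Spec_get_common_str_front s1 s2 (get_common_str_front s1 s2)

-- ===== LEMMAS AND PROOFS =====

-- 'the suffix of s1 starting at i matches s2 as far as both are defined' (A's inner condition)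
def pvCond (l1 l2 : List Char) (i : Nat) : Prop :=
  ∀ j, j < l2.length → i + j < l1.length → l1.getD (i + j) 'a' = l2.getD j 'a'

lemma pvAInner_one_iff (l1 l2 : List Char) (i : Nat) :
    ∀ js, pvAInner l1 l2 i js = 1 ↔
      ∃ j ∈ js, i + j < l1.length ∧ l1.getD (i + j) 'a' ≠ l2.getD j 'a' := by
  intro js
  induction js with
  | nil => simp [pvAInner]
  | cons j js ih =>
    by_cases h : i + j < l1.length ∧ l1.getD (i + j) 'a' ≠ l2.getD j 'a' <;>
      · simp [pvAInner, h, ih]; tauto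

lemma pvAInner_ne_one_iff (l1 l2 : List Char) (i : Nat) :
    (¬ pvAInner l1 l2 i (List.range l2.length) = 1) ↔ pvCond l1 l2 i := by
  rw [pvAInner_one_iff]
  simp [pvCond]

lemma pvAOuter_none (l1 l2 : List Char) :
    ∀ c i, 1 ≤ c → i + c = l1.length →
      (∀ q, i ≤ q → q < l1.length → ¬ pvCond l1 l2 q) →
      pvAOuter l1 l2 (List.range' i c) = 0 := by
  intro c
  induction c with
  | zero => omega
  | succ c ih =>
    intro i _ hic hnone
    have hflag : pvAInner l1 l2 i (List.range l2.length) = 1 := by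
      by_contra h
      exact hnone i le_rfl (by omega) ((pvAInner_ne_one_iff l1 l2 i).mp h)
    rcases Nat.eq_zero_or_pos c with hc | hc
    · subst hc
      simp [pvAOuter, hflag]
      omega
    · obtain ⟨c', rfl⟩ : ∃ c', c = c' + 1 := ⟨c - 1, by omega⟩
      rw [List.range'_succ, List.range'_succ]
      show pvAOuter l1 l2 (i :: (i+1) :: List.range' (i+1+1) c') = 0
      rw [show pvAOuter l1 l2 (i :: (i+1) :: List.range' (i+1+1) c')
            = if pvAInner l1 l2 i (List.range l2.length) = 1
              then pvAOuter l1 l2 ((i+1) :: List.range' (i+1+1) c')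
              else (l1.length : Int) - i from rfl]
      rw [if_pos hflag, ← List.range'_succ]
      exact ih (i + 1) (by omega) (by omega) (fun q hq => hnone q (by omega))

lemma pvAOuter_found (l1 l2 : List Char) :
    ∀ c i q, i + c = l1.length →
      i ≤ q → q < l1.length → pvCond l1 l2 q →
      (∀ q', i ≤ q' → q' < q → ¬ pvCond l1 l2 q') →
      pvAOuter l1 l2 (List.range' i c) = (l1.length : Int) - q := by
  intro c
  induction c with
  | zero => intro i q h1 h2 h3; omega
  | succ c ih =>
    intro i q hic hiq hq hcond hleast
    by_cases hi : q = i
    · subst hi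
      have hflag : ¬ pvAInner l1 l2 q (List.range l2.length) = 1 :=
        (pvAInner_ne_one_iff l1 l2 q).mpr hcond
      rcases Nat.eq_zero_or_pos c with hc | hc
      · subst hc; simp [pvAOuter, hflag]
      · obtain ⟨c', rfl⟩ : ∃ c', c = c' + 1 := ⟨c - 1, by omega⟩
        rw [List.range'_succ, List.range'_succ]
        show pvAOuter l1 l2 (q :: (q+1) :: List.range' (q+1+1) c') = _
        rw [show pvAOuter l1 l2 (q :: (q+1) :: List.range' (q+1+1) c')
              = if pvAInner l1 l2 q (List.range l2.length) = 1
                then pvAOuter l1 l2 ((q+1) :: List.range' (q+1+1) c')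
                else (l1.length : Int) - q from rfl]
        rw [if_neg hflag]
    · have hflag : pvAInner l1 l2 i (List.range l2.length) = 1 := by
        by_contra h
        exact hleast i le_rfl (by omega) ((pvAInner_ne_one_iff l1 l2 i).mp h)
      have hc : 1 ≤ c := by omega
      obtain ⟨c', rfl⟩ : ∃ c', c = c' + 1 := ⟨c - 1, by omega⟩
      rw [List.range'_succ, List.range'_succ]
      show pvAOuter l1 l2 (i :: (i+1) :: List.range' (i+1+1) c') = _
      rw [show pvAOuter l1 l2 (i :: (i+1) :: List.range' (i+1+1) c')
            = if pvAInner l1 l2 i (List.range l2.length) = 1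
              then pvAOuter l1 l2 ((i+1) :: List.range' (i+1+1) c')
              else (l1.length : Int) - i from rfl]
      rw [if_pos hflag, ← List.range'_succ]
      exact ih (i + 1) q (by omega) (by omega) hq hcond
        (fun q' hq1 hq2 => hleast q' (by omega) hq2)

-- B's loop predicate: s1.endswith(s2[:k])
def pvP (l1 l2 : List Char) (k : Nat) : Prop :=
  PySem.Chars.endswith l1 (PySem.List.slice l2 none (some (k : Int))) = true

lemma pvBLoop_none (l1 l2 : List Char) :
    ∀ k, (∀ k', 1 ≤ k' → k' ≤ k → ¬ pvP l1 l2 k') → pvBLoop l1 l2 k = 0 := by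
  intro k
  induction k with
  | zero => intro _; rfl
  | succ k ih =>
    intro h
    have : ¬ pvP l1 l2 (k + 1) := h (k + 1) (by omega) le_rfl
    simp only [pvBLoop, pvP] at this ⊢
    rw [if_neg this]
    exact ih (fun k' h1 h2 => h k' h1 (by omega))

lemma pvBLoop_found (l1 l2 : List Char) :
    ∀ k k', 1 ≤ k' → k' ≤ k → pvP l1 l2 k' →
      (∀ k'', k' < k'' → k'' ≤ k → ¬ pvP l1 l2 k'') →
      pvBLoop l1 l2 k = (k' : Int) := by
  intro k
  induction k with
  | zero => intro k' h1 h2; omega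
  | succ k ih =>
    intro k' h1 h2 hP hmax
    by_cases hk : k' = k + 1
    · subst hk
      simp only [pvBLoop, pvP] at hP ⊢
      rw [if_pos hP]
    · have : ¬ pvP l1 l2 (k + 1) := hmax (k + 1) (by omega) le_rfl
      simp only [pvBLoop, pvP] at this ⊢
      rw [if_neg this]
      exact ih k' h1 (by omega) hP (fun k'' ha hb => hmax k'' ha (by omega))

-- full-occurrence characterisation of pvCond
lemma pvCond_iff_prefix (l1 l2 : List Char) (q : Nat) (h : q + l2.length ≤ l1.length) :
    pvCond l1 l2 q ↔ l2 <+: l1.drop q := by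
  rw [List.prefix_iff_eq_take]
  constructor
  · intro hc
    apply List.ext_getElem
    · simp; omega
    · intro j hj1 hj2
      have := hc j (by omega) (by omega)
      rw [List.getD_eq_getElem l1 'a' (by omega), List.getD_eq_getElem l2 'a' (by omega)] at this
      simpa using this.symm
  · intro heq j hj hij
    rw [List.getD_eq_getElem l1 'a' (by omega), List.getD_eq_getElem l2 'a' (by omega)]
    have := congrArg (fun l => l[j]?) heq
    simp only [List.getElem?_take, List.getElem?_drop] at this
    rw [List.getElem?_eq_getElem (by omega), if_pos hj, List.getElem?_eq_getElem (by omega)] at this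
    exact (Option.some.inj this).symm

-- overlap characterisation of pvCond
lemma pvCond_iff_suffix (l1 l2 : List Char) (k : Nat) (h1 : 1 ≤ k) (h2 : k ≤ l1.length)
    (h3 : k ≤ l2.length) :
    pvCond l1 l2 (l1.length - k) ↔ pvP l1 l2 k := by
  unfold pvP
  rw [PySem.List.slice_to_natCast l2 k, PySem.Chars.endswith_iff, List.suffix_iff_eq_drop]
  have hlen : (l2.take k).length = k := by simp; omega
  rw [hlen]
  constructor
  · intro hc
    apply List.ext_getElem
    · simp; omega
    · intro j hj1 hj2
      simp only [hlen] at hj1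
      have := hc j (by omega) (by omega)
      rw [List.getD_eq_getElem l1 'a' (by omega), List.getD_eq_getElem l2 'a' (by omega)] at this
      simp only [List.getElem_take, List.getElem_drop]
      exact this.symm
  · intro heq j hj hij
    have hjk : j < k := by omega
    rw [List.getD_eq_getElem l1 'a' (by omega), List.getD_eq_getElem l2 'a' (by omega)]
    have := congrArg (fun l => l[j]?) heq
    simp only [List.getElem?_take, List.getElem?_drop] at this
    rw [List.getElem?_eq_getElem (by omega), if_pos hjk, List.getElem?_eq_getElem (by omega)] at this
    exact (Option.some.inj this).symm

-- ===== VERDICT (by name: the statement is the Claim_ definition above) =====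
theorem get_common_str_front_spec : Claim_equal_get_common_str_front := by
  intro s1 s2 _ hpre
  unfold Spec_get_common_str_front get_common_str_front get_common_str_front_alt
  have hn0 : s1.toList.length ≠ 0 := fun h =>
    hpre (String.toList_eq_nil_iff.mp (List.length_eq_zero_iff.mp h))
  set l1 := s1.toList with hl1
  set l2 := s2.toList with hl2
  rw [if_neg hn0]
  simp only [PySem.Str.find_eq, ← hl1, ← hl2]
  by_cases hfind : PySem.Chars.find l1 l2 = -1
  · -- no full occurrence of s2 in s1: B runs its downward overlap scan
    rw [hfind, if_neg (by simp)]
    have hnin : ¬ l2 <:+: l1 := (PySem.Chars.find_eq_neg_one_iff l1 l2).mp hfind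
    have hnoocc : ∀ q, ¬ l2 <+: l1.drop q := by
      intro q hq
      exact hnin ((PySem.Chars.isIn_iff_infix l2 l1).mp
        ((PySem.Chars.exists_prefix_drop_iff_isIn l2 l1).mp ⟨q, hq⟩))
    have hbig : ∀ q, pvCond l1 l2 q → l1.length < q + l2.length := by
      intro q hc
      by_contra h
      exact hnoocc q ((pvCond_iff_prefix l1 l2 q (by omega)).mp hc)
    by_cases hex : ∃ q, q < l1.length ∧ pvCond l1 l2 q
    · haveI : DecidablePred fun q => q < l1.length ∧ pvCond l1 l2 q :=
        fun _ => Classical.dec _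
      obtain ⟨hq0n, hc0⟩ := Nat.find_spec hex
      set q0 := Nat.find hex with hq0
      have hmin : ∀ q' < q0, ¬ (q' < l1.length ∧ pvCond l1 l2 q') :=
        fun q' h => Nat.find_min hex h
      have hk'm : l1.length - q0 ≤ l2.length := by have := hbig q0 hc0; omega
      have hP : pvP l1 l2 (l1.length - q0) := by
        refine (pvCond_iff_suffix l1 l2 (l1.length - q0) (by omega) (by omega) hk'm).mp ?_
        rw [show l1.length - (l1.length - q0) = q0 by omega]
        exact hc0
      rw [List.range_eq_range',
        pvAOuter_found l1 l2 l1.length 0 q0 (by omega) (by omega) hq0n hc0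
          (fun q' _ h hc => hmin q' h ⟨by omega, hc⟩),
        pvBLoop_found l1 l2 (min l1.length l2.length) (l1.length - q0) (by omega)
          (by omega) hP ?_]
      · omega
      · intro k'' hgt hle hPk''
        have hc'' := (pvCond_iff_suffix l1 l2 k'' (by omega) (by omega) (by omega)).mpr hPk''
        exact hmin (l1.length - k'') (by omega) ⟨by omega, hc''⟩
    · push Not at hex
      rw [List.range_eq_range',
        pvAOuter_none l1 l2 l1.length 0 (by omega) (by omega)
          (fun q _ hq hc => hex q hq hc),
        pvBLoop_none l1 l2 (min l1.length l2.length) ?_]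
      intro k' h1 h2 hP
      have hc := (pvCond_iff_suffix l1 l2 k' h1 (by omega) (by omega)).mpr hP
      exact hex (l1.length - k') (by omega) hc
  · -- s2 occurs in s1: B returns len(s1) - s1.find(s2)
    rw [if_pos (by simpa using hfind)]
    have hp0 : 0 ≤ PySem.Chars.find l1 l2 := by
      have := PySem.Chars.neg_one_le_find l1 l2
      omega
    obtain ⟨hpref, hminp⟩ := PySem.Chars.find_spec hp0
    set q0 := (PySem.Chars.find l1 l2).toNat with hq0
    have hq0le : q0 ≤ l1.length := by
      have := PySem.Chars.find_le_length l1 l2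
      omega
    have hq0m : q0 + l2.length ≤ l1.length := by
      have := hpref.length_le
      rw [List.length_drop] at this
      omega
    have hcond : pvCond l1 l2 q0 := (pvCond_iff_prefix l1 l2 q0 hq0m).mpr hpref
    have hq0n : q0 < l1.length := by
      by_cases hm : l2.length = 0
      · have : l2 = [] := List.length_eq_zero_iff.mp hm
        have : PySem.Chars.find l1 l2 = 0 := by rw [this]; exact PySem.Chars.find_nil l1
        omega
      · omega
    rw [List.range_eq_range',
      pvAOuter_found l1 l2 l1.length 0 q0 (by omega) (by omega) hq0n hcond
        (fun q' _ h hc =>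
          hminp q' h ((pvCond_iff_prefix l1 l2 q' (by omega)).mp hc))]
    omega
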